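-- pv_equiv track=rewrite | github.com/reter-ai/reter_code | src/reter_code/reter_wrapper.py | _path_to_module_name
-- ===== SOURCE A (Python) =====
-- from typing import List, Optional, Callable, TypeVar, Any, Tuple, Dict, Set
--
-- def _path_to_module_name(file_path: str, package_roots: Optional[Set[str]] = None) -> str:
--     """
--     Convert a file path to a Python module name, respecting package structure.
--
--     Python module names are determined by the package hierarchy:
--     - A directory is a package only if it contains __init__.py
--     - Module names are relative to the nearest package root
--     - Files outside packages use just their filename
--
--     Args:
--         file_path: Relative file path with forward slashes (e.g., "src/utils/helpers.py")
--         package_roots: Set of directory paths that contain __init__.py files.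
--                       If None, falls back to simple path-to-dots conversion.
--
--     Returns:
--         Python module name using dot notation
--
--     Examples with package_roots={"src", "src/utils", "src/utils/sub"}:
--         "src/utils/helpers.py" -> "utils.helpers"  (src is package root)
--         "src/utils/__init__.py" -> "utils"
--         "src/utils/sub/mod.py" -> "utils.sub.mod"
--         "tests/test_foo.py" -> "test_foo"  (tests/ has no __init__.py)
--         "script.py" -> "script"
--
--     Examples with package_roots=None (legacy behavior):
--         "src/utils/helpers.py" -> "src.utils.helpers"
--     """
--     # Remove .py extension
--     if file_path.endswith('.py'):
--         module_path = file_path[:-3]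
--     else:
--         module_path = file_path
--
--     # Handle __init__.py - use parent directory as module name
--     if module_path.endswith('/__init__'):
--         module_path = module_path[:-9]  # Remove "/__init__"
--
--     # If no package structure info, fall back to simple conversion
--     if package_roots is None:
--         module_name = module_path.replace('/', '.')
--         return module_name if module_name else "__init__"
--
--     # Find the package root for this file
--     # Walk up from the file's directory to find the topmost package
--     parts = module_path.split('/')
--
--     if len(parts) == 1:
--         # File at root level (e.g., "script.py")
--         return parts[0] if parts[0] else "__init__"
--
--     # Find the deepest directory that starts a package chain
--     # A valid package root is where:
--     # 1. The directory has __init__.py (is in package_roots)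
--     # 2. All ancestors up to that point also have __init__.py
--
--     # Build list of ancestor directories
--     # For "src/utils/sub/mod.py" -> ["src", "src/utils", "src/utils/sub"]
--     ancestors = []
--     for i in range(len(parts) - 1):  # -1 to exclude the file itself
--         ancestors.append('/'.join(parts[:i+1]))
--
--     # Find the topmost package root (the first ancestor that is a package)
--     package_start_idx = None
--     for i, ancestor in enumerate(ancestors):
--         if ancestor in package_roots:
--             # Check if this starts a valid package chain
--             # All directories from here to the file must be packages
--             is_valid_chain = True
--             for j in range(i, len(ancestors)):
--                 if ancestors[j] not in package_roots:
--                     is_valid_chain = False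
--                     break
--
--             if is_valid_chain:
--                 package_start_idx = i
--                 break
--
--     if package_start_idx is not None:
--         # Module name starts from the package root's name
--         # e.g., if "src" is package root and file is "src/utils/helpers.py"
--         # then module name is "utils.helpers" (relative to src's parent)
--         # BUT if we want the full qualified name from the package root:
--         # "src.utils.helpers"
--         module_parts = parts[package_start_idx:]
--         module_name = '.'.join(module_parts)
--     else:
--         # No valid package chain - just use the filename
--         module_name = parts[-1]
--
--     return module_name if module_name else "__init__"
-- ===== SOURCE B (Python) =====
-- from typing import Optional, Set
--
--
-- def _path_to_module_name(file_path: str, package_roots: Optional[Set[str]] = None) -> str: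
--     """One forward pass with an accumulator instead of A's nested search:
--     scan the directories left to right, growing the prefix string incrementally,
--     and keep the start of the current run of consecutive package directories
--     (reset on a non-package).  The run alive at the end is the maximal package
--     suffix, whose start is exactly what A's quadratic search finds."""
--     name = file_path.removesuffix('.py')
--     name = name.removesuffix('/__init__')
--
--     if package_roots is None:
--         return name.replace('/', '.') or "__init__"
--
--     parts = name.split('/')
--     tail = parts[-1]
--     if len(parts) == 1:
--         return tail or "__init__"
--
--     start = None
--     prefix = None
--     for i, d in enumerate(parts[:-1]):
--         prefix = d if prefix is None else prefix + '/' + d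
--         if prefix in package_roots:
--             if start is None:
--                 start = i
--         else:
--             start = None
--
--     if start is None:
--         return tail or "__init__"
--     return '.'.join(parts[start:]) or "__init__"
-- ===== Notes on version B (the rewrite author's own statement) =====
-- stated objective: alternative
-- what changed: A's nested quadratic search (for each ancestor, re-scan the whole remaining chain) is replaced by a single left-to-right pass that grows the directory prefix incrementally and tracks the start of the current run of package directories (reset on a miss), whose surviving value is the start of the maximal package suffix; the suffix stripping uses str.removesuffix instead of endswith+slice.
import Mathlib
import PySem

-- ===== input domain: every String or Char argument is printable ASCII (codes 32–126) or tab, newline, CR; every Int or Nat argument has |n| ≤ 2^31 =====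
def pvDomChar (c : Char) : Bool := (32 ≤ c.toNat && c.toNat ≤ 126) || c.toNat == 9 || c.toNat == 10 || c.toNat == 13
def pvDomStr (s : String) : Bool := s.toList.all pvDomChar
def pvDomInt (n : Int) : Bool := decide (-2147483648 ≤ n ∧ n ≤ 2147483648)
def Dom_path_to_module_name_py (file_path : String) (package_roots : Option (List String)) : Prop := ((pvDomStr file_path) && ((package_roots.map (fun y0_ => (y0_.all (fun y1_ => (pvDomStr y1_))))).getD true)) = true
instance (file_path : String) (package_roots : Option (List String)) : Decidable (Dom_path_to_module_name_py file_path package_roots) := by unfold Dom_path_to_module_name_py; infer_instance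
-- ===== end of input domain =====

-- B replaces A's nested quadratic package-root search by one forward pass that grows
-- the directory prefix incrementally and tracks the start of the current package run.

-- ===== PORT A =====
-- outer loop 'for i, ancestor in enumerate(ancestors)': the part of ancestors not yet
-- visited is the suffix 'rest'; the inner chain check 'for j in range(i, len(ancestors))'
-- reads exactly that same suffix ancestors[i:] = rest, with 'break' = List.all.
def aSearch (roots : List String) : List String → Nat → Option Nat
  | [], _ => none
  | a :: t, i =>
      if roots.contains a then
        (if (a :: t).all (fun anc => roots.contains anc) then some i
         else aSearch roots t (i + 1))
      else aSearch roots t (i + 1)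

def path_to_module_name_py (file_path : String) (package_roots : Option (List String)) : String :=
  let module_path := if PySem.Str.endswith file_path ".py" then PySem.Str.slice file_path none (some (-3)) else file_path
  let module_path := if PySem.Str.endswith module_path "/__init__" then PySem.Str.slice module_path none (some (-9)) else module_path
  match package_roots with
  | none =>
      let module_name := PySem.Str.replace module_path "/" "."
      if module_name = "" then "__init__" else module_name
  | some roots =>
      let parts := (PySem.Str.split? module_path "/").getD []   -- sep "/" ≠ "", so split? is always some
      if parts.length = 1 then
        (if parts.getD 0 "" = "" then "__init__" else parts.getD 0 "")
      else
        -- 'for i in range(len(parts)-1): ancestors.append("/".join(parts[:i+1]))'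
        let ancestors := (List.range (parts.length - 1)).map (fun i => PySem.Str.join "/" (parts.take (i + 1)))
        let module_name :=
          match aSearch roots ancestors 0 with
          | some idx => PySem.Str.join "." (parts.drop idx)
          | none => parts.getLastD ""           -- parts[-1]
        if module_name = "" then "__init__" else module_name

-- ===== PORT B =====
-- 'name.removesuffix(suf)', kept at the List Char level where B's port works
def rmsuffix (cs suf : List Char) : List Char :=
  if suf.isSuffixOf cs then cs.take (cs.length - suf.length) else cs

-- body of B's 'for i, d in enumerate(parts[:-1])' loop; state = (start, prefix)
def bStep (roots : List String) (st : Option Int × Option (List Char))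
    (p : Int × List Char) : Option Int × Option (List Char) :=
  let pref := match st.2 with
    | none => p.2                       -- 'prefix = d' on the first directory
    | some q => q ++ '/' :: p.2         -- 'prefix = prefix + "/" + d'
  if roots.contains (String.ofList pref) then
    (match st.1 with
     | none => some p.1                 -- 'if start is None: start = i'
     | some s => some s, some pref)
  else (none, some pref)                -- 'start = None'

def path_to_module_name_py_alt (file_path : String) (package_roots : Option (List String)) : String :=
  let name := rmsuffix (rmsuffix file_path.toList ".py".toList) "/__init__".toList
  match package_roots with
  | none =>
      let mn := PySem.Chars.replace name "/".toList ".".toList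
      if mn.isEmpty then "__init__" else String.ofList mn
  | some roots =>
      let parts := (PySem.Chars.split? name "/".toList).getD []   -- sep "/" ≠ ""
      let tail := parts.getLastD []                               -- parts[-1]
      if parts.length = 1 then
        (if tail.isEmpty then "__init__" else String.ofList tail)
      else
        let st := (PySem.List.enumerate parts.dropLast 0).foldl (bStep roots) (none, none)
        match st.1 with
        | none => if tail.isEmpty then "__init__" else String.ofList tail
        | some s =>
            let mn := PySem.Chars.join ".".toList (parts.drop s.toNat)
            if mn.isEmpty then "__init__" else String.ofList mn

-- ===== PRECONDITION & SPEC =====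
def Spec_path_to_module_name_py (file_path : String) (package_roots : Option (List String)) (out : String) : Prop := out = path_to_module_name_py_alt file_path package_roots
instance (file_path : String) (package_roots : Option (List String)) (out : String) : Decidable (Spec_path_to_module_name_py file_path package_roots out) := by unfold Spec_path_to_module_name_py; infer_instance

-- ===== CLAIM (what is proved, stated in full; the proofs are below) =====
def Claim_equal_path_to_module_name_py : Prop := ∀ (file_path : String) (package_roots : Option (List String)), Dom_path_to_module_name_py file_path package_roots → Spec_path_to_module_name_py file_path package_roots (path_to_module_name_py file_path package_roots)

-- ===== LEMMAS AND PROOFS =====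

-- Python s[:-k] on a string of length ≥ k
lemma slice_neg {α : Type} (cs : List α) (k : Nat) (hk : 0 < k) (h : k ≤ cs.length) :
    PySem.List.slice cs none (some (-(k:Int))) = cs.take (cs.length - k) := by
  unfold PySem.List.slice PySem.List.clampIdx
  simp only
  split_ifs with h1 h2 <;> [skip; skip; omega] <;> simp <;> omega

-- A's 'endswith + slice' equals B's removesuffix, at the List Char level
lemma strip_gen (s p : String) (k : Nat) (hk : 0 < k) (hlen : p.toList.length = k) :
    (if PySem.Str.endswith s p then PySem.Str.slice s none (some (-(k:Int))) else s).toList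
      = rmsuffix s.toList p.toList := by
  by_cases h : PySem.Str.endswith s p
  · have hs : p.toList.isSuffixOf s.toList = true := by
      simpa [PySem.Str.endswith, PySem.Chars.endswith] using h
    have hle : k ≤ s.toList.length := by
      have := List.IsSuffix.length_le (by simpa using hs)
      omega
    rw [if_pos h]
    unfold rmsuffix
    rw [if_pos hs, hlen]
    simp [slice_neg s.toList k hk hle]
  · have hs : ¬ (p.toList.isSuffixOf s.toList = true) := by
      simpa [PySem.Str.endswith, PySem.Chars.endswith] using h
    rw [if_neg h]
    unfold rmsuffix
    rw [if_neg hs]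

lemma stripPy (s : String) :
    (if PySem.Str.endswith s ".py" then PySem.Str.slice s none (some (-3)) else s).toList
      = rmsuffix s.toList ".py".toList := by
  have h := strip_gen s ".py" 3 (by norm_num) (by rfl)
  simpa using h

lemma stripInit (s : String) :
    (if PySem.Str.endswith s "/__init__" then PySem.Str.slice s none (some (-9)) else s).toList
      = rmsuffix s.toList "/__init__".toList := by
  have h := strip_gen s "/__init__" 9 (by norm_num) (by rfl)
  simpa using h

lemma ofList_empty (l : List Char) : String.ofList l = "" ↔ l = [] := by
  constructor
  · intro h; simpa using congrArg String.toList h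
  · rintro rfl; rfl

lemma getLastD_map_ofList (l : List (List Char)) :
    ∀ d, (l.map String.ofList).getLastD (String.ofList d) = String.ofList (l.getLastD d) := by
  induction l with
  | nil => intro d; rfl
  | cons a t ih =>
      intro d
      rw [List.map_cons, List.getLastD_cons, List.getLastD_cons]
      exact ih a

-- 'join(l + [d])' grows a join by one piece
lemma join_concat (sep d : List Char) :
    ∀ (l : List (List Char)), l ≠ [] →
      PySem.Chars.join sep (l ++ [d]) = PySem.Chars.join sep l ++ sep ++ d := by
  intro l
  induction l with
  | nil => intro h; exact absurd rfl h
  | cons a t ih =>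
      intro _
      cases t with
      | nil => simp [PySem.Chars.join_cons_cons, PySem.Chars.join_singleton]
      | cons b u =>
          simp only [List.cons_append]
          rw [PySem.Chars.join_cons_cons]
          rw [show (b :: (u ++ [d])) = ((b :: u) ++ [d]) by simp]
          rw [ih (by simp), PySem.Chars.join_cons_cons]
          simp [List.append_assoc]

-- B's incremental prefix equals the joined directory prefix
lemma join_take_succ (pc : List (List Char)) (m : Nat) (h : m < pc.length) (hm : 0 < m) :
    PySem.Chars.join ['/'] (pc.take (m+1)) = PySem.Chars.join ['/'] (pc.take m) ++ '/' :: pc[m] := by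
  have ht : pc.take (m+1) = pc.take m ++ [pc[m]] := by
    rw [List.take_add_one]
    simp [List.getElem?_eq_getElem h]
  have hne : pc.take m ≠ [] := by
    intro hc
    rw [List.take_eq_nil_iff] at hc
    rcases hc with rfl | rfl <;> simp_all
  rw [ht, join_concat _ _ _ hne]
  simp

-- proof-side: the 'all ancestors from k on are packages' predicate, as one Bool per index
def pvF (roots : List String) (pc : List (List Char)) (j : Nat) : Bool :=
  roots.contains (String.ofList (PySem.Chars.join ['/'] (pc.take (j+1))))

-- proof-side: start of the maximal F-true suffix of [0, m), as a backward scan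
def bScan (F : Nat → Bool) : Nat → Nat
  | 0 => 0
  | k + 1 => if F k then bScan F k else k + 1

-- proof-side: the value of B's 'start' accumulator after m iterations
def gIdx (F : Nat → Bool) : Nat → Option Nat
  | 0 => none
  | m + 1 =>
      if F m then
        (match gIdx F m with
         | none => some m
         | some s => some s)
      else none

lemma gIdx_succ (F : Nat → Bool) (m : Nat) :
    gIdx F (m+1) = if F m then some ((gIdx F m).getD m) else none := by
  conv_lhs => rw [gIdx]
  cases hg : gIdx F m <;> cases hf : F m <;> simp [hf, hg]

lemma bScan_le (F : Nat → Bool) : ∀ m, bScan F m ≤ m := by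
  intro m
  induction m with
  | zero => simp [bScan]
  | succ k ih => unfold bScan; split <;> omega

lemma bScan_true (F : Nat → Bool) :
    ∀ m j, bScan F m ≤ j → j < m → F j = true := by
  intro m
  induction m with
  | zero => omega
  | succ k ih =>
      intro j h1 h2
      unfold bScan at h1
      split at h1
      · rcases Nat.lt_or_ge j k with hj | hj
        · exact ih j h1 hj
        · have : j = k := by omega
          subst this; assumption
      · omega

lemma bScan_min (F : Nat → Bool) :
    ∀ m k, (∀ j, k ≤ j → j < m → F j = true) → bScan F m ≤ k := by
  intro m
  induction m with
  | zero => intro k _; simp [bScan]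
  | succ i ih =>
      intro k hk
      rcases Nat.lt_or_ge k (i + 1) with h | h
      · have hfi : F i = true := hk i (by omega) (by omega)
        unfold bScan
        rw [hfi]
        simp only [if_true]
        exact ih k (fun j h1 h2 => hk j h1 (by omega))
      · exact le_trans (bScan_le F (i + 1)) h

-- B's accumulator is exactly the start of the maximal package suffix
lemma gIdx_eq (F : Nat → Bool) :
    ∀ m, gIdx F m = if bScan F m < m then some (bScan F m) else none := by
  intro m
  induction m with
  | zero => simp [gIdx, bScan]
  | succ k ih =>
      unfold gIdx bScan
      by_cases hf : F k = true
      · rw [hf]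
        simp only [if_true, ih]
        by_cases hb : bScan F k < k
        · rw [if_pos hb, if_pos (by omega)]
        · have : bScan F k = k := by have := bScan_le F k; omega
          rw [if_neg hb, if_pos (by omega), this]
      · rw [Bool.not_eq_true] at hf
        rw [hf]
        simp only [Bool.false_eq_true, if_false]
        rw [if_neg (by omega)]

-- A's nested search returns some (i + k) at the minimal k whose whole suffix is in roots
lemma aSearch_some (roots : List String) :
    ∀ (l : List String) (i k : Nat),
      (∀ k', (l.drop k').all (fun a => roots.contains a) = true → k ≤ k') →
      k < l.length →
      (l.drop k).all (fun a => roots.contains a) = true →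
      aSearch roots l i = some (i + k) := by
  intro l
  induction l with
  | nil => intro i k _ h; simp at h
  | cons a t ih =>
      intro i k hmin hlen hall
      match k with
      | 0 =>
          have ha : roots.contains a = true := by
            simp only [List.drop_zero, List.all_cons, Bool.and_eq_true] at hall
            exact hall.1
          unfold aSearch
          rw [ha]
          simp only [if_true]
          rw [if_pos (by simpa using hall)]
          simp
      | k' + 1 =>
          have h0 : ¬ ((a :: t).all (fun x => roots.contains x) = true) := by
            intro h
            have := hmin 0 (by simpa using h)
            omega
          have step : aSearch roots t (i + 1) = some (i + 1 + k') := by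
            refine ih (i + 1) k' (fun m hm => ?_) (by simp at hlen; omega)
              (by simpa using hall)
            have := hmin (m + 1) (by simpa using hm)
            omega
          unfold aSearch
          by_cases hc : roots.contains a = true
          · rw [hc]
            simp only [if_true]
            rw [if_neg h0, step]
            congr 1
            omega
          · rw [Bool.not_eq_true] at hc
            rw [hc]
            simp only [Bool.false_eq_true, if_false]
            rw [step]
            congr 1
            omega

lemma aSearch_none (roots : List String) :
    ∀ (l : List String) (i : Nat),
      (∀ k, k < l.length → ¬ ((l.drop k).all (fun a => roots.contains a) = true)) →
      aSearch roots l i = none := by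
  intro l
  induction l with
  | nil => intro i _; rfl
  | cons a t ih =>
      intro i h
      have h0 : ¬ ((a :: t).all (fun x => roots.contains x) = true) := by
        have := h 0 (by simp)
        simpa using this
      have step : aSearch roots t (i + 1) = none := by
        refine ih (i + 1) (fun k hk => ?_)
        have := h (k + 1) (by simp; omega)
        simpa using this
      unfold aSearch
      by_cases hc : roots.contains a = true
      · rw [hc]; simp only [if_true]; rw [if_neg h0, step]
      · rw [Bool.not_eq_true] at hc
        rw [hc]; simp only [Bool.false_eq_true, if_false]; exact step

-- suffix-all over the mapped ancestor list, pointwise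
lemma suffix_all_iff (roots : List String) (anc : Nat → String) (n k : Nat) :
    (((List.range n).map anc).drop k).all (fun a => roots.contains a) = true
      ↔ (∀ j, k ≤ j → j < n → roots.contains (anc j) = true) := by
  rw [← List.map_drop, List.range_eq_range', List.drop_range']
  simp only [Nat.zero_add, Nat.mul_one, List.all_eq_true, List.mem_map, List.mem_range'_1,
    forall_exists_index, and_imp]
  constructor
  · intro h j h1 h2
    exact h _ j h1 (by omega) rfl
  · rintro h x j h1 h2 rfl
    exact h j h1 (by omega)

-- the bridge: A's nested search finds exactly the start of the maximal package suffix
lemma bridge (roots : List String) (anc : Nat → String) (n : Nat) :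
    aSearch roots ((List.range n).map anc) 0
      = (if bScan (fun j => roots.contains (anc j)) n < n
         then some (bScan (fun j => roots.contains (anc j)) n) else none) := by
  set F := fun j => roots.contains (anc j) with hF
  by_cases h : bScan F n < n
  · rw [if_pos h]
    have := aSearch_some roots ((List.range n).map anc) 0 (bScan F n)
      (fun k' hk' => by
        rw [suffix_all_iff] at hk'
        exact bScan_min F n k' hk')
      (by simpa using h)
      (by
        rw [suffix_all_iff]
        intro j h1 h2
        exact bScan_true F n j h1 h2)
    simpa using this
  · rw [if_neg h]
    refine aSearch_none roots _ 0 (fun k hk hall => ?_)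
    rw [suffix_all_iff] at hall
    have := bScan_min F n k hall
    simp only [List.length_map, List.length_range] at hk
    omega

-- B's loop, unrolled m times, carries (gIdx, joined prefix)
lemma fold_inv (roots : List String) (pc : List (List Char)) :
    ∀ m, m ≤ pc.dropLast.length →
      (PySem.List.enumerate (pc.dropLast.take m) 0).foldl (bStep roots) (none, none)
        = ((gIdx (pvF roots pc) m).map (fun s : Nat => (s : Int)),
           if m = 0 then none else some (PySem.Chars.join ['/'] (pc.take m))) := by
  intro m
  induction m with
  | zero => intro _; simp [PySem.List.enumerate, gIdx]
  | succ m ih =>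
      intro hm1
      have hm : m < pc.dropLast.length := by omega
      have hmp : m < pc.length := by
        simp [List.length_dropLast] at hm; omega
      have hds : pc.dropLast.take (m+1) = pc.dropLast.take m ++ [pc[m]] := by
        rw [List.take_add_one]
        simp [List.getElem?_eq_getElem hm, List.getElem_dropLast]
      have hlen : (pc.dropLast.take m).length = m := by
        simp; omega
      rw [hds, PySem.List.enumerate_append, List.foldl_append, ih (by omega)]
      rw [hlen]
      rw [show PySem.List.enumerate [pc[m]] (0 + (m:Int)) = [((m:Int), pc[m])] by
        simp [PySem.List.enumerate_cons, PySem.List.enumerate_nil]]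
      simp only [List.foldl_cons, List.foldl_nil]
      unfold bStep
      by_cases h0 : m = 0
      · subst h0
        rw [if_pos rfl, if_neg (by omega : ¬ ((0:Nat) + 1 = 0))]
        have h1 : pc.take (0+1) = [pc[0]] := by
          rw [List.take_add_one]
          simp [List.getElem?_eq_getElem hmp]
        have hpref : PySem.Chars.join ['/'] (pc.take (0+1)) = pc[0] := by
          rw [h1, PySem.Chars.join_singleton]
        simp only [gIdx, pvF, hpref]
        split_ifs <;> simp
      · rw [if_neg h0]
        simp only
        have hpref : PySem.Chars.join ['/'] (pc.take m) ++ '/' :: pc[m]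
            = PySem.Chars.join ['/'] (pc.take (m+1)) :=
          (join_take_succ pc m hmp (by omega)).symm
        rw [hpref]
        rw [if_neg (by omega : ¬ (m+1 = 0))]
        rw [show (roots.contains (String.ofList (PySem.Chars.join ['/'] (pc.take (m+1))))) = pvF roots pc m from rfl]
        rw [gIdx_succ]
        cases hpv : pvF roots pc m
        · simp [hpv]
        · simp only [hpv, if_true]
          cases gIdx (pvF roots pc) m <;> simp

-- ===== VERDICT (by name: the statement is the Claim_ definition above) =====
set_option maxHeartbeats 1000000 in
theorem path_to_module_name_py_spec : Claim_equal_path_to_module_name_py := by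
  intro file_path package_roots _
  unfold Spec_path_to_module_name_py path_to_module_name_py path_to_module_name_py_alt
  dsimp only
  have e2 := stripInit (if PySem.Str.endswith file_path ".py" then PySem.Str.slice file_path none (some (-3)) else file_path)
  rw [stripPy file_path] at e2
  have hname : (if PySem.Str.endswith (if PySem.Str.endswith file_path ".py" then PySem.Str.slice file_path none (some (-3)) else file_path) "/__init__" then PySem.Str.slice (if PySem.Str.endswith file_path ".py" then PySem.Str.slice file_path none (some (-3)) else file_path) none (some (-9)) else (if PySem.Str.endswith file_path ".py" then PySem.Str.slice file_path none (some (-3)) else file_path)) = String.ofList (rmsuffix (rmsuffix file_path.toList ".py".toList) "/__init__".toList) := by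
    rw [← e2, String.ofList_toList]
  rw [hname]
  generalize rmsuffix (rmsuffix file_path.toList ".py".toList) "/__init__".toList = nm
  cases package_roots with
  | none =>
      simp only [PySem.Str.replace, String.toList_ofList]
      by_cases h : PySem.Chars.replace nm "/".toList ".".toList = []
      · rw [h]
        simp
      · rw [if_neg (by rw [ofList_empty]; exact h), if_neg (by simpa using h)]
  | some roots =>
      simp only [PySem.Str.split?, String.toList_ofList, PySem.Chars.split?,
        show ("/".toList.isEmpty) = false from rfl, Bool.false_eq_true, if_false,
        Option.map_some, Option.getD_some]
      generalize PySem.Chars.splitOn nm "/".toList = pc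
      simp only [List.length_map]
      by_cases hl : pc.length = 1
      · rw [if_pos hl, if_pos hl]
        obtain ⟨x, rfl⟩ : ∃ x, pc = [x] := by
          cases pc with
          | nil => simp at hl
          | cons a t =>
              cases t with
              | nil => exact ⟨a, rfl⟩
              | cons b u => simp at hl
        simp only [List.map_cons, List.map_nil, List.getD_cons_zero, List.getLastD_cons,
          List.getLastD_nil]
        by_cases hx : x = []
        · rw [hx]; simp
        · rw [if_neg (by rw [ofList_empty]; exact hx), if_neg (by simpa using hx)]
      · rw [if_neg hl, if_neg hl]
        have hanc : (fun i => PySem.Str.join "/" ((pc.map String.ofList).take (i+1)))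
            = (fun i => String.ofList (PySem.Chars.join ['/'] (pc.take (i+1)))) := by
          funext i
          rw [PySem.Str.join]
          congr 1
          rw [← List.map_take, List.map_map]
          simp [Function.comp_def, show ("/".toList) = ['/'] from rfl]
        rw [hanc, bridge roots _ (pc.length - 1)]
        have hfold := fold_inv roots pc pc.dropLast.length (le_refl _)
        rw [List.take_length] at hfold
        rw [hfold]
        simp only [List.length_dropLast]
        rw [gIdx_eq]
        rw [show (fun j => roots.contains (String.ofList (PySem.Chars.join ['/'] (pc.take (j+1))))) = pvF roots pc from rfl]
        by_cases hb : bScan (pvF roots pc) (pc.length - 1) < pc.length - 1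
        · rw [if_pos hb]
          simp only [Option.map_some]
          have hjoin : PySem.Str.join "." ((pc.map String.ofList).drop (bScan (pvF roots pc) (pc.length - 1)))
              = String.ofList (PySem.Chars.join ".".toList (pc.drop (bScan (pvF roots pc) (pc.length - 1)))) := by
            rw [PySem.Str.join]
            congr 1
            rw [← List.map_drop, List.map_map]
            simp [Function.comp_def]
          rw [hjoin, Int.toNat_natCast]
          set mn := PySem.Chars.join ".".toList (pc.drop (bScan (pvF roots pc) (pc.length - 1)))
          by_cases h : mn = []
          · rw [h]; simp
          · rw [if_neg (by rw [ofList_empty]; exact h), if_neg (by simpa using h)]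
        · rw [if_neg hb]
          simp only [Option.map_none]
          rw [show ("" : String) = String.ofList [] from rfl, getLastD_map_ofList]
          set tl := pc.getLastD []
          by_cases h : tl = []
          · rw [h]; simp
          · rw [if_neg (by rw [ofList_empty]; exact h), if_neg (by simpa using h)]
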